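-- pv_equiv track=rewrite | github.com/byronpalate/ctt | ctt/funciones.py | ruta_en_media
-- ===== SOURCE A (Python) =====
-- def ruta_en_media(fichero):
--     path = ''
--     incluir = False
--     if '/' in fichero:
--         separador = '/'
--     else:
--         separador = '\\'
--     for elemento in fichero.split(separador):
--         if not incluir:
--             if elemento == 'media':
--                 incluir = True
--         if incluir:
--             path += '/' + elemento
--     return path
-- ===== SOURCE B (Python) =====
-- def ruta_en_media(fichero):
--     separador = '/' if '/' in fichero else '\\'
--     partes = fichero.split(separador)
--     try:
--         i = partes.index('media')
--     except ValueError: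
--         return ''
--     return ''.join('/' + p for p in partes[i:])
-- ===== Notes on version B (the rewrite author's own statement) =====
-- stated objective: simpler
-- what changed: Replaces the boolean-flag scan with string concatenation by locating the first 'media' segment via index() and joining only the suffix slice.
import Mathlib
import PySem

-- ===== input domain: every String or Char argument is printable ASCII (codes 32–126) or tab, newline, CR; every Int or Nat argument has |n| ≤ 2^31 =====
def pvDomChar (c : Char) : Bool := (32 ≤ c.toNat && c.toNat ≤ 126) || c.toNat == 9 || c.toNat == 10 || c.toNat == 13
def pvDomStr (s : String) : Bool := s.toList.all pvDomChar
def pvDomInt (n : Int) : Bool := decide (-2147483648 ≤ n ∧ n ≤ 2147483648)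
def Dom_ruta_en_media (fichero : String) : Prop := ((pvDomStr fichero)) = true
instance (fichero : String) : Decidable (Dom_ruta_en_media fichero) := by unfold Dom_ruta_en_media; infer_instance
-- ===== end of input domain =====

-- B is simpler: it finds the first 'media' segment with index() and joins the suffix, instead of A's flag-toggling scan with string +=; return values proved equal on all inputs.

-- ===== PORT A =====
-- A's loop over fichero.split(separador) with state (path, incluir); strings handled as List Char (exact on the ASCII domain).
def ruta_en_media (fichero : String) : String :=
  let separador : List Char := if PySem.Str.isIn "/" fichero then ['/'] else ['\\']
  let st := (PySem.Chars.splitOn fichero.toList separador).foldl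
    (fun (st : List Char × Bool) (elemento : List Char) =>
      let incluir := if !st.2 then (if elemento == ['m','e','d','i','a'] then true else st.2) else st.2
      let path := if incluir then st.1 ++ ('/' :: elemento) else st.1
      (path, incluir))
    ([], false)
  String.ofList st.1

-- ===== PORT B =====
def ruta_en_media_alt (fichero : String) : String :=
  let separador : List Char := if PySem.Str.isIn "/" fichero then ['/'] else ['\\']
  let partes := PySem.Chars.splitOn fichero.toList separador
  match PySem.List.index? partes ['m','e','d','i','a'] with
  | none => ""
  | some i => String.ofList (PySem.Chars.join [] ((partes.drop i).map (fun p => '/' :: p)))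

-- ===== PRECONDITION & SPEC =====
def Spec_ruta_en_media (fichero : String) (out : String) : Prop := out = ruta_en_media_alt fichero
instance (fichero : String) (out : String) : Decidable (Spec_ruta_en_media fichero out) := by unfold Spec_ruta_en_media; infer_instance

-- ===== CLAIM (what is proved, stated in full; the proofs are below) =====
def Claim_equal_ruta_en_media : Prop := ∀ (fichero : String), Dom_ruta_en_media fichero → Spec_ruta_en_media fichero (ruta_en_media fichero)

-- ===== LEMMAS AND PROOFS =====

def pvStep (st : List Char × Bool) (elemento : List Char) : List Char × Bool :=
  let incluir := if !st.2 then (if elemento == ['m','e','d','i','a'] then true else st.2) else st.2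
  let path := if incluir then st.1 ++ ('/' :: elemento) else st.1
  (path, incluir)

lemma pv_join_nil_eq_flatten (l : List (List Char)) :
    PySem.Chars.join [] l = l.flatten := by
  induction l with
  | nil => simp [PySem.Chars.join_nil]
  | cons p rest ih =>
    cases rest with
    | nil => simp [PySem.Chars.join_singleton]
    | cons q r => simp [PySem.Chars.join_cons_cons, ih]

lemma pv_fold_true (l : List (List Char)) (s : List Char) :
    l.foldl pvStep (s, true) = (s ++ (l.map (fun p => '/' :: p)).flatten, true) := by
  induction l generalizing s with
  | nil => simp
  | cons e t ih => simp [pvStep, ih]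

lemma pv_fold_false (l : List (List Char)) (s : List Char) :
    (l.foldl pvStep (s, false)).1 =
      s ++ (match PySem.List.index? l ['m','e','d','i','a'] with
            | none => []
            | some i => ((l.drop i).map (fun p => '/' :: p)).flatten) := by
  induction l generalizing s with
  | nil => simp [PySem.List.index?]
  | cons e t ih =>
    by_cases he : e = ['m','e','d','i','a']
    · subst he
      rw [PySem.List.index?_cons_self]
      simp [pvStep, pv_fold_true]
    · rw [PySem.List.index?_cons_of_ne t he]
      have hstep : pvStep (s, false) e = (s, false) := by
        simp [pvStep, he]
      rw [List.foldl_cons, hstep, ih]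
      cases PySem.List.index? t ['m','e','d','i','a'] <;> simp

-- ===== VERDICT (by name: the statement is the Claim_ definition above) =====
theorem ruta_en_media_spec : Claim_equal_ruta_en_media := by
  intro fichero _
  unfold Spec_ruta_en_media ruta_en_media ruta_en_media_alt
  have h := pv_fold_false
      (PySem.Chars.splitOn fichero.toList
        (if PySem.Str.isIn "/" fichero then ['/'] else ['\\'])) []
  simp only [show (fun (st : List Char × Bool) (elemento : List Char) =>
      let incluir := if !st.2 then (if elemento == ['m','e','d','i','a'] then true else st.2) else st.2
      let path := if incluir then st.1 ++ ('/' :: elemento) else st.1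
      (path, incluir)) = pvStep from rfl]
  rw [h]
  cases PySem.List.index?
      (PySem.Chars.splitOn fichero.toList
        (if PySem.Str.isIn "/" fichero then ['/'] else ['\\'])) ['m','e','d','i','a'] with
  | none => rfl
  | some i => simp [pv_join_nil_eq_flatten]
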